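-- pv_equiv track=rewrite | github.com/viveshok/codejam | ReorderingTrainCars/main.py | solve
-- ===== SOURCE A (Python) =====
-- def solve(train, cars):
--     result = 0
--     if cars:
--         for car in cars:
--             if car[0] == train[-1] and set(car) & set(train) == {car[0]}:
--                 new_cars = list(cars)
--                 new_cars.remove(car)
--                 result += solve(train+car, new_cars)
--             elif not set(car) & set(train):
--                 new_cars = list(cars)
--                 new_cars = list(cars)
--                 new_cars.remove(car)
--                 result += solve(train+car, new_cars)
--
--     else:
--         return 1
--
--     return result
-- ===== SOURCE B (Python) =====
-- def solve(train, cars):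
--     # Iterative worklist instead of recursion: explicit stack of (train, remaining) states.
--     stack = [(train, list(cars))]
--     count = 0
--     while stack:
--         t, rem = stack.pop()
--         if not rem:
--             count += 1
--         else:
--             for car in rem:
--                 if car[0] == t[-1] and set(car) & set(t) == {car[0]}:
--                     new_rem = list(rem)
--                     new_rem.remove(car)
--                     stack.append((t + car, new_rem))
--                 elif not set(car) & set(t):
--                     new_rem = list(rem)
--                     new_rem.remove(car)
--                     stack.append((t + car, new_rem))
--     return count
-- ===== Notes on version B (the rewrite author's own statement) =====
-- stated objective: alternative
-- what changed: B replaces A's recursion with an iterative worklist: an explicit stack of (train, remaining) states and a counter, popping a state, counting it when no cars remain, and otherwise pushing successor states under A's verbatim tests.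
import Mathlib
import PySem

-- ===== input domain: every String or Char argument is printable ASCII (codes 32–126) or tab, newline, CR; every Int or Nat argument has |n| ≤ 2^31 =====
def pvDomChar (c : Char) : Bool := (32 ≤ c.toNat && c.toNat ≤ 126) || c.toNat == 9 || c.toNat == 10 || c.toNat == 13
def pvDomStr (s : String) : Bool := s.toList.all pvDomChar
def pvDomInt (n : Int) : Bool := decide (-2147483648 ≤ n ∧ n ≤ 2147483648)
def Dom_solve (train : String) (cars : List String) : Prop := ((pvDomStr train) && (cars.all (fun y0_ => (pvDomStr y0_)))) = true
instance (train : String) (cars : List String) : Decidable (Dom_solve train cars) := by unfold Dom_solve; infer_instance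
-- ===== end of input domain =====

-- B replaces A's recursion with an iterative explicit-stack worklist over (train, remaining)
-- states; same value wherever the Python A returns (Pre_ excludes exactly A's IndexErrors).


-- ===== PORT A =====
-- recursive count: for each car, two mutually exclusive tests, recurse on train+car
def solveCore (train : List Char) (cars : List (List Char)) : Int :=
  if _h : cars = [] then 1
  else
    cars.attach.foldl (fun result (x : {c // c ∈ cars}) =>
      let car := x.1
      let inter := PySem.Set.inter (PySem.Set.ofList car) (PySem.Set.ofList train)
      let c0 := PySem.List.pyGetD car 0 ' '
      if (c0 == PySem.List.pyGetD train (-1) ' ') &&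
         PySem.Set.equal inter (PySem.Set.ofList [c0]) then
        result + solveCore (train ++ car) (cars.erase car)
      else if inter.isEmpty then
        result + solveCore (train ++ car) (cars.erase car)
      else result) 0
termination_by cars.length
decreasing_by
  all_goals
    have : 0 < cars.length := List.length_pos_iff.mpr _h
    simp [List.length_erase_of_mem x.2]
    omega

def solve (train : String) (cars : List String) : Int :=
  solveCore train.toList (cars.map String.toList)

-- ===== PORT B =====
-- termination measure for the worklist: pvF k bounds the work of a state with k cars left
def pvF : Nat → Nat
  | 0 => 1
  | k + 1 => (k + 1) * pvF k + 1

def pvMeasure (st : List (List Char × List (List Char))) : Nat :=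
  (st.map (fun s => pvF s.2.length)).sum

-- each foldl step either keeps the stack or pushes one state of weight m
lemma pvMeasure_foldl_le {α : Type}
    (step : List (List Char × List (List Char)) → α → List (List Char × List (List Char)))
    (m : Nat)
    (hstep : ∀ s x, step s x = s ∨
      ∃ y, step s x = y :: s ∧ pvF y.2.length = m) :
    ∀ (l : List α) (st), pvMeasure (l.foldl step st) ≤ pvMeasure st + l.length * m := by
  intro l
  induction l with
  | nil => intro st; simp
  | cons x l ih =>
    intro st
    have hb : pvMeasure (step st x) ≤ pvMeasure st + m := by
      rcases hstep st x with h1 | ⟨y, hy, hm⟩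
      · rw [h1]; omega
      · rw [hy]; simp [pvMeasure, hm]; omega
    simp only [List.foldl_cons, List.length_cons]
    calc pvMeasure (l.foldl step (step st x)) ≤ pvMeasure (step st x) + l.length * m := ih _
      _ ≤ (pvMeasure st + m) + l.length * m := Nat.add_le_add_right hb _
      _ = pvMeasure st + (l.length + 1) * m := by ring

lemma pvStep_spec (t : List Char) (rem : List (List Char))
    (s : List (List Char × List (List Char))) (x : {c // c ∈ rem}) :
    (let car := x.1
     if (PySem.List.pyGetD car 0 ' ' == PySem.List.pyGetD t (-1) ' ') &&
        PySem.Set.equal (PySem.Set.inter (PySem.Set.ofList car) (PySem.Set.ofList t))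
          (PySem.Set.ofList [PySem.List.pyGetD car 0 ' ']) then
       (t ++ car, rem.erase car) :: s
     else if (PySem.Set.inter (PySem.Set.ofList car) (PySem.Set.ofList t)).isEmpty then
       (t ++ car, rem.erase car) :: s
     else s) = s ∨
    ∃ y, (let car := x.1
     if (PySem.List.pyGetD car 0 ' ' == PySem.List.pyGetD t (-1) ' ') &&
        PySem.Set.equal (PySem.Set.inter (PySem.Set.ofList car) (PySem.Set.ofList t))
          (PySem.Set.ofList [PySem.List.pyGetD car 0 ' ']) then
       (t ++ car, rem.erase car) :: s
     else if (PySem.Set.inter (PySem.Set.ofList car) (PySem.Set.ofList t)).isEmpty then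
       (t ++ car, rem.erase car) :: s
     else s) = y :: s ∧ pvF y.2.length = pvF (rem.length - 1) := by
  dsimp only
  split_ifs with h1 h2
  · exact Or.inr ⟨_, rfl, by rw [List.length_erase_of_mem x.2]⟩
  · exact Or.inr ⟨_, rfl, by rw [List.length_erase_of_mem x.2]⟩
  · exact Or.inl rfl

lemma pvMeasure_push_lt (t : List Char) (rem : List (List Char)) (hrem : rem ≠ [])
    (rest : List (List Char × List (List Char))) :
    pvMeasure (rem.attach.foldl (fun st (x : {c // c ∈ rem}) =>
      let car := x.1
      if (PySem.List.pyGetD car 0 ' ' == PySem.List.pyGetD t (-1) ' ') &&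
         PySem.Set.equal (PySem.Set.inter (PySem.Set.ofList car) (PySem.Set.ofList t))
           (PySem.Set.ofList [PySem.List.pyGetD car 0 ' ']) then
        (t ++ car, rem.erase car) :: st
      else if (PySem.Set.inter (PySem.Set.ofList car) (PySem.Set.ofList t)).isEmpty then
        (t ++ car, rem.erase car) :: st
      else st) rest) < pvMeasure ((t, rem) :: rest) := by
  have hle := pvMeasure_foldl_le _ (pvF (rem.length - 1)) (pvStep_spec t rem) rem.attach rest
  obtain ⟨k, hk⟩ : ∃ k, rem.length = k + 1 := by
    cases rem with
    | nil => exact absurd rfl hrem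
    | cons a l => exact ⟨l.length, rfl⟩
  have hmeas : pvMeasure ((t, rem) :: rest) = pvF rem.length + pvMeasure rest := by
    simp [pvMeasure]
  rw [hmeas, hk]
  simp only [List.length_attach, hk] at hle
  calc pvMeasure _ ≤ pvMeasure rest + (k + 1) * pvF (k + 1 - 1) := hle
    _ < pvF (k + 1) + pvMeasure rest := by simp [pvF]; omega

-- the worklist loop: pop a state; empty remaining counts 1, else push successor states
def solveLoop : List (List Char × List (List Char)) → Int → Int
  | [], count => count
  | (t, rem) :: rest, count =>
    if hrem : rem = [] then solveLoop rest (count + 1)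
    else
      solveLoop
        (rem.attach.foldl (fun st (x : {c // c ∈ rem}) =>
          let car := x.1
          if (PySem.List.pyGetD car 0 ' ' == PySem.List.pyGetD t (-1) ' ') &&
             PySem.Set.equal (PySem.Set.inter (PySem.Set.ofList car) (PySem.Set.ofList t))
               (PySem.Set.ofList [PySem.List.pyGetD car 0 ' ']) then
            (t ++ car, rem.erase car) :: st
          else if (PySem.Set.inter (PySem.Set.ofList car) (PySem.Set.ofList t)).isEmpty then
            (t ++ car, rem.erase car) :: st
          else st) rest)
        count
termination_by st _ => pvMeasure st
decreasing_by
  · simp [pvMeasure, hrem, pvF]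
  · exact pvMeasure_push_lt t rem hrem rest

def solve_alt (train : String) (cars : List String) : Int :=
  solveLoop [(train.toList, cars.map String.toList)] 0

-- ===== PRECONDITION & SPEC =====
-- Pre_ excludes exactly the inputs on which Python A raises IndexError (an empty car string
-- with cars nonempty, or an empty train with cars left to place); B raises there too.
def Pre_solve (train : String) (cars : List String) : Prop :=
  "" ∉ cars ∧ (train ≠ "" ∨ cars = [])
instance (train : String) (cars : List String) : Decidable (Pre_solve train cars) := by
  unfold Pre_solve; infer_instance
def pvWitness_solve : String × List String := ("a", ["b", "ac"])
def Spec_solve (train : String) (cars : List String) (out : Int) : Prop := out = solve_alt train cars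
instance (train : String) (cars : List String) (out : Int) : Decidable (Spec_solve train cars out) := by unfold Spec_solve; infer_instance

-- ===== CLAIM (what is proved, stated in full; the proofs are below) =====
def Claim_equal_solve : Prop := ∀ (train : String) (cars : List String), Dom_solve train cars → Pre_solve train cars → Spec_solve train cars (solve train cars)

-- ===== LEMMAS AND PROOFS =====

-- sum of A's recursive values over the stack
def pvSumVal (st : List (List Char × List (List Char))) : Int :=
  (st.map (fun s => solveCore s.1 s.2)).sum

lemma pvSum_push (t : List Char) (rem : List (List Char)) :
    ∀ (l : List {c // c ∈ rem}) (st : List (List Char × List (List Char))) (acc : Int),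
    (l.foldl (fun result (x : {c // c ∈ rem}) =>
      let car := x.1
      let inter := PySem.Set.inter (PySem.Set.ofList car) (PySem.Set.ofList t)
      let c0 := PySem.List.pyGetD car 0 ' '
      if (c0 == PySem.List.pyGetD t (-1) ' ') &&
         PySem.Set.equal inter (PySem.Set.ofList [c0]) then
        result + solveCore (t ++ car) (rem.erase car)
      else if inter.isEmpty then
        result + solveCore (t ++ car) (rem.erase car)
      else result) acc) + pvSumVal st =
    acc + pvSumVal (l.foldl (fun st (x : {c // c ∈ rem}) =>
      let car := x.1
      if (PySem.List.pyGetD car 0 ' ' == PySem.List.pyGetD t (-1) ' ') &&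
         PySem.Set.equal (PySem.Set.inter (PySem.Set.ofList car) (PySem.Set.ofList t))
           (PySem.Set.ofList [PySem.List.pyGetD car 0 ' ']) then
        (t ++ car, rem.erase car) :: st
      else if (PySem.Set.inter (PySem.Set.ofList car) (PySem.Set.ofList t)).isEmpty then
        (t ++ car, rem.erase car) :: st
      else st) st) := by
  intro l
  induction l with
  | nil => intro st acc; simp
  | cons x l ih =>
    intro st acc
    simp only [List.foldl_cons]
    split_ifs with h1 h2
    · have h := ih ((t ++ ↑x, rem.erase ↑x) :: st) (acc + solveCore (t ++ ↑x) (rem.erase ↑x))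
      simp only [pvSumVal, List.map_cons, List.sum_cons] at h ⊢
      omega
    · have h := ih ((t ++ ↑x, rem.erase ↑x) :: st) (acc + solveCore (t ++ ↑x) (rem.erase ↑x))
      simp only [pvSumVal, List.map_cons, List.sum_cons] at h ⊢
      omega
    · exact ih st acc

lemma solveLoop_eq : ∀ (n : Nat) (st : List (List Char × List (List Char))) (count : Int),
    pvMeasure st = n → solveLoop st count = count + pvSumVal st := by
  intro n
  induction n using Nat.strong_induction_on with
  | _ n ih =>
    intro st count hn
    match st with
    | [] => simp [solveLoop, pvSumVal]
    | (t, rem) :: rest =>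
      rw [solveLoop]
      by_cases hrem : rem = []
      · subst hrem
        rw [dif_pos rfl]
        have hlt : pvMeasure rest < n := by
          subst hn; simp [pvMeasure, pvF]
        rw [ih _ hlt rest (count + 1) rfl]
        have : solveCore t [] = 1 := by rw [solveCore]; simp
        simp [pvSumVal, this]
        ring
      · rw [dif_neg hrem]
        have hlt : pvMeasure (rem.attach.foldl _ rest) < n := hn ▸ pvMeasure_push_lt t rem hrem rest
        rw [ih _ hlt _ count rfl]
        have hsum := pvSum_push t rem rem.attach rest 0
        have hcore : solveCore t rem = rem.attach.foldl (fun result (x : {c // c ∈ rem}) =>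
            let car := x.1
            let inter := PySem.Set.inter (PySem.Set.ofList car) (PySem.Set.ofList t)
            let c0 := PySem.List.pyGetD car 0 ' '
            if (c0 == PySem.List.pyGetD t (-1) ' ') &&
               PySem.Set.equal inter (PySem.Set.ofList [c0]) then
              result + solveCore (t ++ car) (rem.erase car)
            else if inter.isEmpty then
              result + solveCore (t ++ car) (rem.erase car)
            else result) 0 := by
          rw [solveCore, dif_neg hrem]
        have : pvSumVal ((t, rem) :: rest) = solveCore t rem + pvSumVal rest := by
          simp [pvSumVal]
        rw [this, hcore]
        omega

-- ===== VERDICT (by name: the statement is the Claim_ definition above) =====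
theorem solve_spec : Claim_equal_solve := by
  intro train cars _ _
  unfold Spec_solve solve solve_alt
  rw [solveLoop_eq (pvMeasure [(train.toList, cars.map String.toList)]) _ 0 rfl]
  simp [pvSumVal]
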